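-- pv_equiv track=rewrite | github.com/LawsonOliveira/Tsunami | src/Deprecated/Polynomials/searching_combinations.py | combi_indep
-- ===== SOURCE A (Python) =====
-- def combi_indep(N, D):
--     '''
--     returns sorted possible combinations of D tuples of integer in [0,N-1].
--     DO NOT use itertools package
--     Recursive
--
--     Variables :
--         - N (int) = N-1 is the higher possible component.
--         - D (int) = the dimension, the size of a combination
--     Returns :
--         list of possible combinations of exponents (not sorted)
--     '''
--     combi_poss = []
--     # initialize
--     if not(D):
--         # no possibility
--         return combi_poss
--     elif D == 1:
--         return [[i] for i in range(N)]
--     # core of recursivity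
--     for combi_Dprec in combi_indep(N, D-1):
--         for i in range(N):
--             combi_poss.append([i]+combi_Dprec)
--     return combi_poss
-- ===== SOURCE B (Python) =====
-- def combi_indep(N, D):
--     # Iterative mixed-radix counting: the j-th combination is the base-N digit
--     # expansion of j (least significant digit first), no recursion needed.
--     if D == 0 or N <= 0:
--         return []
--     out = []
--     for k in range(N ** D):
--         digits = []
--         for _ in range(D):
--             k, r = divmod(k, N)
--             digits.append(r)
--         out.append(digits)
--     return out
-- ===== Notes on version B (the rewrite author's own statement) =====
-- stated objective: alternative
-- what changed: Replaces the recursion on D (each level re-traversing the previous level's list and prepending) with a single iterative loop over k in range(N**D) that emits the base-N digit expansion of k, least significant digit first.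
import Mathlib
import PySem

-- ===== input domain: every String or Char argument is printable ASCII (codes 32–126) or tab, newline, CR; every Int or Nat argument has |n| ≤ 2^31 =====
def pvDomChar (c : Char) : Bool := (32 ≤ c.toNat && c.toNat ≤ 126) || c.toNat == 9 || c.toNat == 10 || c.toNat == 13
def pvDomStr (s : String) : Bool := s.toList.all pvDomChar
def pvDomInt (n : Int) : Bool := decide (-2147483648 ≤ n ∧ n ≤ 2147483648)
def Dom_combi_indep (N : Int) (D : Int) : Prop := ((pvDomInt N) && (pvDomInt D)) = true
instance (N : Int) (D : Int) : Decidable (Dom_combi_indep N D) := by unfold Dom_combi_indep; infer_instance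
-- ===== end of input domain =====

-- B replaces A's recursion on D with one iterative loop emitting base-N digit expansions (alternative decomposition, same cost).

-- ===== PORT A =====
-- A recurses on D; for D ≥ 0 this is structural recursion on D.toNat (for D < 0
-- Python recurses forever — excluded by Pre_).
def combiA (N : Int) : Nat → List (List Int)
  | 0 => []                                              -- if not(D): return []
  | 1 => (PySem.List.pyRange 0 N 1).map (fun i => [i])   -- [[i] for i in range(N)]
  | d + 2 =>                                             -- for combi_Dprec in combi_indep(N, D-1): for i in range(N): append([i]+combi_Dprec)
    (combiA N (d + 1)).foldl
      (fun acc c => (PySem.List.pyRange 0 N 1).foldl (fun acc2 i => acc2 ++ [i :: c]) acc) []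

def combi_indep (N : Int) (D : Int) : List (List Int) := combiA N D.toNat

-- ===== PORT B =====
-- inner loop of Source B: D times take (k % N, k //= N), appending each remainder
def digitsB (N : Int) : Nat → Int → List Int
  | 0, _ => []
  | d + 1, k => PySem.Int.mod k N :: digitsB N d (PySem.Int.floordiv k N)

def combi_indep_alt (N : Int) (D : Int) : List (List Int) :=
  if D = 0 ∨ N ≤ 0 then []
  else (PySem.List.pyRange 0 (N ^ D.toNat) 1).foldl (fun out k => out ++ [digitsB N D.toNat k]) []

-- ===== PRECONDITION & SPEC =====
-- Pre_ excludes D < 0, where A recurses without end (RecursionError).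
def Pre_combi_indep (N : Int) (D : Int) : Prop := 0 ≤ D
instance (N : Int) (D : Int) : Decidable (Pre_combi_indep N D) := by unfold Pre_combi_indep; infer_instance
def pvWitness_combi_indep : Int × Int := (3, 2)

def Spec_combi_indep (N : Int) (D : Int) (out : List (List Int)) : Prop := out = combi_indep_alt N D
instance (N : Int) (D : Int) (out : List (List Int)) : Decidable (Spec_combi_indep N D out) := by unfold Spec_combi_indep; infer_instance

-- ===== CLAIM (what is proved, stated in full; the proofs are below) =====
def Claim_equal_combi_indep : Prop := ∀ (N : Int) (D : Int), Dom_combi_indep N D → Pre_combi_indep N D → Spec_combi_indep N D (combi_indep N D)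

-- ===== LEMMAS AND PROOFS =====

-- N ≤ 0: every level of A's recursion is empty
theorem combiA_nonpos (N : Int) (hN : N ≤ 0) : ∀ d : Nat, combiA N d = [] := by
  intro d
  induction d with
  | zero => rfl
  | succ d ih =>
    cases d with
    | zero => simp [combiA, PySem.List.pyRange_one_eq_nil hN]
    | succ d => simp [combiA, ih]

theorem range_mul_flatMap {α : Type} (n : Nat) (f : Nat → α) :
    ∀ a : Nat, (List.range (a * n)).map f
      = (List.range a).flatMap (fun j => (List.range n).map (fun i => f (j * n + i))) := by
  intro a
  induction a with
  | zero => simp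
  | succ a ih =>
    have h1 : (a + 1) * n = a * n + n := by ring
    rw [h1, List.range_add, List.map_append, ih, List.range_succ, List.flatMap_append]
    simp [List.map_map, Function.comp_def]

-- digit expansion of j*n + i (0 ≤ i < n)
theorem digitsB_step (n d j i : Nat) (hn : 0 < n) (hi : i < n) :
    digitsB (n : Int) (d + 1) ((j * n + i : Nat) : Int)
      = (i : Int) :: digitsB (n : Int) d ((j : Nat) : Int) := by
  have hmod : PySem.Int.mod ((j * n + i : Nat) : Int) (n : Int) = (i : Int) := by
    rw [PySem.Int.mod_natCast]
    congr 1
    rw [Nat.add_comm, Nat.add_mul_mod_self_right, Nat.mod_eq_of_lt hi]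
  have hdiv : PySem.Int.floordiv ((j * n + i : Nat) : Int) (n : Int) = ((j : Nat) : Int) := by
    rw [PySem.Int.floordiv_natCast]
    congr 1
    rw [Nat.add_comm, Nat.add_mul_div_right _ _ hn, Nat.div_eq_of_lt hi, Nat.zero_add]
  rw [digitsB, hmod, hdiv]

-- main invariant: A's level d+1 is the list of digit expansions of 0 .. n^(d+1)-1
theorem combiA_eq_digits (n : Nat) (hn : 0 < n) :
    ∀ d : Nat, combiA (n : Int) (d + 1)
      = (List.range (n ^ (d + 1))).map (fun (k : Nat) => digitsB (n : Int) (d + 1) (k : Int)) := by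
  have hr : PySem.List.pyRange 0 (n : Int) 1 = (List.range n).map (fun (k : Nat) => (k : Int)) := by
    exact PySem.List.pyRange_zero_nat n
  intro d
  induction d with
  | zero =>
    rw [combiA, hr, List.map_map, pow_one]
    refine List.map_congr_left ?_
    intro k hk
    rw [List.mem_range] at hk
    simp only [Function.comp_def, digitsB, PySem.Int.mod_natCast]
    rw [Nat.mod_eq_of_lt hk]
  | succ d ih =>
    have houter : combiA (n : Int) (d + 2)
        = (combiA (n : Int) (d + 1)).flatMap
            (fun c => (List.range n).map (fun (i : Nat) => (i : Int) :: c)) := by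
      rw [combiA, hr]
      induction (combiA (n : Int) (d + 1)) using List.reverseRecOn with
      | nil => rfl
      | append_singleton xs c ihx =>
        rw [List.foldl_append, List.foldl_cons, List.foldl_nil, ihx,
          List.flatMap_append, PySem.List.foldl_append_singleton_eq_map,
          List.map_map]
        simp [Function.comp_def]
    rw [houter, ih, List.flatMap_map]
    have hpow : n ^ (d + 2) = n ^ (d + 1) * n := by ring
    rw [hpow, range_mul_flatMap]
    refine List.flatMap_congr ?_
    intro j hj
    refine List.map_congr_left ?_
    intro i hi
    rw [List.mem_range] at hi
    exact (digitsB_step n (d + 1) j i hn hi).symm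

theorem combi_indep_spec : Claim_equal_combi_indep := by
  intro N D _hDom hPre
  unfold Spec_combi_indep combi_indep combi_indep_alt
  by_cases hD : D = 0
  · simp [hD, combiA]
  · by_cases hN : N ≤ 0
    · simp [hN, combiA_nonpos N hN]
    · rw [not_le] at hN
      have hDpos : 0 < D := lt_of_le_of_ne hPre (Ne.symm hD)
      rw [if_neg (by rintro (h | h) <;> omega)]
      obtain ⟨d, hd⟩ : ∃ d : Nat, D.toNat = d + 1 :=
        ⟨D.toNat - 1, by omega⟩
      obtain ⟨n, hn⟩ : ∃ n : Nat, N = (n : Int) ∧ 0 < n := by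
        refine ⟨N.toNat, by omega, by omega⟩
      obtain ⟨hNn, hnpos⟩ := hn
      subst hNn
      rw [hd, combiA_eq_digits n hnpos d]
      have hpowcast : ((n : Int) ^ (d + 1)) = ((n ^ (d + 1) : Nat) : Int) := by
        push_cast; ring
      rw [hpowcast, PySem.List.pyRange_zero_nat,
        PySem.List.foldl_append_singleton_eq_map, List.map_map]
      simp [Function.comp_def]
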